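-- pv_equiv track=rewrite | github.com/mdob367/Advent-Of-Code | 2023/Day 19.py | reduce_rules
-- ===== SOURCE A (Python) =====
-- from collections import OrderedDict
--
-- def reduce_rules(rule_list, start='in'):
--     if all(v in ['A', 'R'] for v in rule_list[start].values()):
--         return rule_list
--     else:
--         new_rules = OrderedDict()
--         prev_rules = []
--
--         for rule, path in rule_list[start].items():
--             if path in ['A', 'R']:
--                 new_rules[';'.join(prev_rules + [rule])] = path
--             else:
--                 for r, p in rule_list[path].items():
--                     new_rules[';'.join(prev_rules + [rule] + [r])] = p
--             # prev_rules.append(rule.translate(''.maketrans('<>', '><')))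
--         rule_list[start] = new_rules
--         return reduce_rules(rule_list, start)
-- ===== SOURCE B (Python) =====
-- from collections import OrderedDict
--
-- def reduce_rules(rule_list, start='in'):
--     # B mutates rule_list[start] in place exactly like A; same return value.
--     if all(v in ('A', 'R') for v in rule_list[start].values()):
--         return rule_list
--
--     def expand(key_parts, path, out):
--         if path in ('A', 'R'):
--             out[';'.join(key_parts)] = path
--         else:
--             for r, p in rule_list[path].items():
--                 expand(key_parts + [r], p, out)
--
--     out = OrderedDict()
--     for rule, path in rule_list[start].items():
--         expand([rule], path, out)
--     rule_list[start] = out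
--     return rule_list
-- ===== Notes on version B (the rewrite author's own statement) =====
-- stated objective: alternative
-- what changed: A repeatedly rebuilds the whole start dict by one-level inlining rounds and recurses until a fixpoint; B makes a single pass over rule_list[start], fully expanding each rule with a recursive DFS helper.
import Mathlib
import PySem

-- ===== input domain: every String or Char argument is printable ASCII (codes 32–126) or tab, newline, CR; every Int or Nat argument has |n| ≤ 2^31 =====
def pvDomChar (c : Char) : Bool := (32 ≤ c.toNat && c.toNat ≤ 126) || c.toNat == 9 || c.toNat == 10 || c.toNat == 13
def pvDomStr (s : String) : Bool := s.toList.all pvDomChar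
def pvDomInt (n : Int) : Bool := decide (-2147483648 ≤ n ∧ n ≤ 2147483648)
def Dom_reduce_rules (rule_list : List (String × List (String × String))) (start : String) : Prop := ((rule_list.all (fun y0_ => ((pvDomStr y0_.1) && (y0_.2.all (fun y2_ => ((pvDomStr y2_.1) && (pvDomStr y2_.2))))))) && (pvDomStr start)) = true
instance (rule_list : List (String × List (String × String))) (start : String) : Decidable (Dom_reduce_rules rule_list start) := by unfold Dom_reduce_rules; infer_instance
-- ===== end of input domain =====

-- B replaces A's repeated one-level inlining rounds (rebuild the whole start dict, recurse to a fixpoint)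
-- by a single pass that fully expands each rule of rule_list[start] with a recursive DFS helper.
-- Both A and B mutate rule_list[start] in place in the same way; the equivalence proved is about the return value.

-- ===== PORT A =====
-- all(v in ['A', 'R'] for v in d.values())
def pvAllAR (c : List (String × String)) : Bool :=
  c.all (fun kv => kv.2 == "A" || kv.2 == "R")

-- the body of the else-branch: build new_rules by one-level inlining (prev_rules is always [])
def pvExpandA (rule_list : List (String × List (String × String))) (c : List (String × String)) :
    PySem.Dict String String :=
  c.foldl (fun new_rules kv =>
      if kv.2 == "A" || kv.2 == "R" then
        new_rules.insert (PySem.Str.join ";" ([] ++ [kv.1])) kv.2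
      else
        (((PySem.Dict.mk rule_list).get? kv.2).getD []).foldl
          (fun new_rules rp => new_rules.insert (PySem.Str.join ";" ([] ++ [kv.1] ++ [rp.1])) rp.2)
          new_rules)
    PySem.Dict.empty

-- A's tail recursion, made total with fuel (outside Pre_ A raises KeyError / RecursionError)
def reduce_rules_go : Nat → List (String × List (String × String)) → String → List (String × List (String × String))
  | 0, rule_list, _ => rule_list
  | Nat.succ fuel, rule_list, start =>
    let c := ((PySem.Dict.mk rule_list).get? start).getD []
    if pvAllAR c then rule_list
    else reduce_rules_go fuel (((PySem.Dict.mk rule_list).insert start (pvExpandA rule_list c).items).items) start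

def reduce_rules (rule_list : List (String × List (String × String))) (start : String) : List (String × List (String × String)) :=
  reduce_rules_go (rule_list.length + 1) rule_list start

-- ===== PORT B =====
-- B's recursive 'expand' helper, made total with fuel (outside Pre_ B raises KeyError / RecursionError)
def pvExpandDFS (rule_list : List (String × List (String × String))) :
    Nat → List String → String → PySem.Dict String String → PySem.Dict String String
  | 0, _, _, out => out
  | Nat.succ fuel, key_parts, path, out =>
    if path == "A" || path == "R" then
      out.insert (PySem.Str.join ";" key_parts) path
    else
      (((PySem.Dict.mk rule_list).get? path).getD []).foldl
        (fun out rp => pvExpandDFS rule_list fuel (key_parts ++ [rp.1]) rp.2 out)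
        out

def reduce_rules_alt (rule_list : List (String × List (String × String))) (start : String) : List (String × List (String × String)) :=
  let c := ((PySem.Dict.mk rule_list).get? start).getD []
  if c.all (fun kv => kv.2 == "A" || kv.2 == "R") then rule_list
  else
    ((PySem.Dict.mk rule_list).insert start
      (c.foldl (fun out kv => pvExpandDFS rule_list (rule_list.length + 1) [kv.1] kv.2 out) PySem.Dict.empty).items).items

-- ===== PRECONDITION & SPEC =====
-- inner keys distinct (a Python dict cannot repeat them anyway) and free of ';'
def pvKeysOK (d : List (String × String)) : Bool :=
  decide ((d.map Prod.fst).Nodup) && d.all (fun kv => !kv.1.toList.contains ';')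

-- pvGood is a reachability/acyclicity condition on the INPUT's rule-reference graph (not a copy of
-- either implementation, which build joined-key dicts): the value p resolves if it is terminal
-- ('A'/'R') or names a well-formed rule (≠ start, present, ';'-free distinct keys) all of whose
-- values resolve; the depth bound is the number of rules, which bounds the length of every
-- repetition-free reference chain, so it never cuts an acyclic input
def pvGood (rule_list : List (String × List (String × String))) (start : String) : Nat → String → Bool
  | 0, p => p == "A" || p == "R"
  | Nat.succ fuel, p => p == "A" || p == "R" ||
      (p != start &&
        match (PySem.Dict.mk rule_list).get? p with
        | none => false
        | some d => pvKeysOK d && d.all (fun kv => pvGood rule_list start fuel kv.2))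

-- Pre_ excludes inputs where A raises (missing start key, a value naming no rule, a cyclic rule graph:
-- KeyError / RecursionError) and, among inputs where A returns, those whose reachable rule names contain
-- ';' — there the joined keys of distinct rule paths can collide and A's round-by-round overwriting order
-- is an accident of its implementation — and rule lists with duplicate keys, which no Python dict can carry.
def Pre_reduce_rules (rule_list : List (String × List (String × String))) (start : String) : Prop :=
  (rule_list.map Prod.fst).Nodup ∧
  ((PySem.Dict.mk rule_list).get? start).isSome = true ∧
  pvKeysOK (((PySem.Dict.mk rule_list).get? start).getD []) = true ∧
  ∀ kv ∈ ((PySem.Dict.mk rule_list).get? start).getD [],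
    pvGood rule_list start rule_list.length kv.2 = true
instance (rule_list : List (String × List (String × String))) (start : String) : Decidable (Pre_reduce_rules rule_list start) := by unfold Pre_reduce_rules; infer_instance

def pvWitness_reduce_rules : (List (String × List (String × String))) × String :=
  ([("in", [("x<5", "px"), ("y>2", "R")]), ("px", [("z<9", "A"), ("w>1", "R")])], "in")

def Spec_reduce_rules (rule_list : List (String × List (String × String))) (start : String) (out : List (String × List (String × String))) : Prop := out = reduce_rules_alt rule_list start
instance (rule_list : List (String × List (String × String))) (start : String) (out : List (String × List (String × String))) : Decidable (Spec_reduce_rules rule_list start out) := by unfold Spec_reduce_rules; infer_instance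

-- ===== CLAIM (what is proved, stated in full; the proofs are below) =====
def Claim_equal_reduce_rules : Prop := ∀ (rule_list : List (String × List (String × String))) (start : String), Dom_reduce_rules rule_list start → Pre_reduce_rules rule_list start → Spec_reduce_rules rule_list start (reduce_rules rule_list start)

-- ===== LEMMAS AND PROOFS =====

-- abbreviations for the proofs
def pvTerm (p : String) : Bool := p == "A" || p == "R"

def pvL (rule_list : List (String × List (String × String))) (p : String) : List (String × String) :=
  ((PySem.Dict.mk rule_list).get? p).getD []

def pvFold (d : PySem.Dict String String) (ps : List (String × String)) : PySem.Dict String String :=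
  ps.foldl (fun d kv => d.insert kv.1 kv.2) d

-- the full DFS expansion of one entry, as a list, with an explicit string key prefix
def expS (rule_list : List (String × List (String × String))) : Nat → String → String → List (String × String)
  | 0, _, _ => []
  | Nat.succ fuel, k, p =>
    if pvTerm p then [(k, p)]
    else (pvL rule_list p).flatMap (fun rp => expS rule_list fuel (k ++ ";" ++ rp.1) rp.2)

-- one round of A's one-level inlining, as a list
def stepE (rule_list : List (String × List (String × String))) (c : List (String × String)) : List (String × String) :=
  c.flatMap (fun kv =>
    if pvTerm kv.2 then [kv]
    else (pvL rule_list kv.2).map (fun rp => (kv.1 ++ ";" ++ rp.1, rp.2)))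

def flatExp (rule_list : List (String × List (String × String))) (c : List (String × String)) : List (String × String) :=
  c.flatMap (fun kv => expS rule_list (rule_list.length + 1) kv.1 kv.2)

-- component model of the keys: each key is the ';'-join of a list of ';'-free char lists
def joinC : List (List Char) → List Char
  | [] => []
  | [a] => a
  | a :: b :: t => a ++ ';' :: joinC (b :: t)

def stepM (rule_list : List (String × List (String × String))) (m : List (List (List Char) × String)) :
    List (List (List Char) × String) :=
  m.flatMap (fun x =>
    if pvTerm x.2 then [x]
    else (pvL rule_list x.2).map (fun rp => (x.1 ++ [rp.1.toList], rp.2)))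

def KRel (c : List (String × String)) (m : List (List (List Char) × String)) : Prop :=
  c.map (fun kv => (kv.1.toList, kv.2)) = m.map (fun x => (joinC x.1, x.2))

def KAC (x y : List (List Char) × String) : Prop := ¬ x.1 <+: y.1 ∧ ¬ y.1 <+: x.1

def Wf (m : List (List (List Char) × String)) : Prop :=
  m.Pairwise KAC ∧ ∀ x ∈ m, x.1 ≠ [] ∧ ∀ s ∈ x.1, ';' ∉ s

def GoodsF (rule_list : List (String × List (String × String))) (start : String) (f : Nat) (c : List (String × String)) : Prop :=
  ∀ kv ∈ c, pvGood rule_list start f kv.2 = true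

-- ---- string/join lemmas ----
theorem pv_joinC_single (a : List Char) : joinC [a] = a := rfl

theorem pv_joinC_cons_cons (a b : List Char) (t : List (List Char)) :
    joinC (a :: b :: t) = a ++ ';' :: joinC (b :: t) := rfl

theorem pv_toList_semi (a b : String) : (a ++ ";" ++ b).toList = a.toList ++ ';' :: b.toList := by
  simp [String.toList_append]

theorem pv_joinC_append_singleton (l : List (List Char)) (a : List Char) (h : l ≠ []) :
    joinC (l ++ [a]) = joinC l ++ ';' :: a := by
  induction l with
  | nil => exact absurd rfl h
  | cons x t ih =>
    cases t with
    | nil => simp [joinC]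
    | cons y t' =>
      have h3 := ih (by simp)
      simp only [List.cons_append] at h3 ⊢
      rw [pv_joinC_cons_cons, pv_joinC_cons_cons, h3]
      simp

theorem pv_semi_cancel : ∀ (a : List Char) {b xs ys : List Char}, ';' ∉ a → ';' ∉ b →
    a ++ ';' :: xs = b ++ ';' :: ys → a = b ∧ xs = ys := by
  intro a
  induction a with
  | nil =>
    intro b xs ys _ hb h
    cases b with
    | nil => simpa using h
    | cons c t =>
      simp only [List.nil_append, List.cons_append, List.cons.injEq] at h
      exact absurd (h.1 ▸ List.mem_cons_self) hb
  | cons c t ih =>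
    intro b xs ys ha hb h
    cases b with
    | nil =>
      simp only [List.nil_append, List.cons_append, List.cons.injEq] at h
      exact absurd (h.1.symm ▸ List.mem_cons_self) ha
    | cons c' t' =>
      simp only [List.cons_append, List.cons.injEq] at h
      obtain ⟨h1, h2⟩ := h
      obtain ⟨h3, h4⟩ := ih (fun hm => ha (List.mem_cons_of_mem _ hm)) (fun hm => hb (List.mem_cons_of_mem _ hm)) h2
      exact ⟨by rw [h1, h3], h4⟩

theorem pv_joinC_inj : ∀ (l1 l2 : List (List Char)), l1 ≠ [] → l2 ≠ [] →
    (∀ s ∈ l1, ';' ∉ s) → (∀ s ∈ l2, ';' ∉ s) → joinC l1 = joinC l2 → l1 = l2 := by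
  intro l1
  induction l1 with
  | nil => intro l2 h; exact absurd rfl h
  | cons a t ih =>
    intro l2 _ h2 hf1 hf2 heq
    cases l2 with
    | nil => exact absurd rfl h2
    | cons b t' =>
      cases t with
      | nil =>
        cases t' with
        | nil => simpa [joinC] using heq
        | cons y ty =>
          rw [pv_joinC_single, pv_joinC_cons_cons] at heq
          exact absurd (heq ▸ (List.mem_append_right b (List.mem_cons_self)))
            (hf1 a List.mem_cons_self)
      | cons x tx =>
        cases t' with
        | nil =>
          rw [pv_joinC_single, pv_joinC_cons_cons] at heq
          exact absurd (heq ▸ (List.mem_append_right a (List.mem_cons_self)))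
            (hf2 b List.mem_cons_self)
        | cons y ty =>
          rw [pv_joinC_cons_cons, pv_joinC_cons_cons] at heq
          obtain ⟨hab, hrest⟩ := pv_semi_cancel a (hf1 a List.mem_cons_self) (hf2 b List.mem_cons_self) heq
          have := ih (y :: ty) (by simp) (by simp)
            (fun s hs => hf1 s (List.mem_cons_of_mem _ hs))
            (fun s hs => hf2 s (List.mem_cons_of_mem _ hs)) hrest
          rw [hab, this]

theorem pv_chars_join_eq : ∀ (ls : List (List Char)), PySem.Chars.join [';'] ls = joinC ls := by
  intro ls
  induction ls with
  | nil => rfl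
  | cons a t ih =>
    cases t with
    | nil => simp [PySem.Chars.join, List.intercalate, List.intersperse, joinC]
    | cons b t' =>
      rw [pv_joinC_cons_cons, ← ih]
      simp [PySem.Chars.join, List.intercalate, List.intersperse]

theorem pv_join_toList (parts : List String) :
    (PySem.Str.join ";" parts).toList = joinC (parts.map String.toList) := by
  have h : (PySem.Str.join ";" parts) = String.ofList (PySem.Chars.join [';'] (parts.map String.toList)) := rfl
  rw [h, pv_chars_join_eq]
  simp

theorem pv_join_single (a : String) : PySem.Str.join ";" [a] = a := by
  rw [← String.toList_inj, pv_join_toList]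
  simp [joinC]

theorem pv_join_pair (a b : String) : PySem.Str.join ";" [a, b] = a ++ ";" ++ b := by
  rw [← String.toList_inj, pv_join_toList, pv_toList_semi]
  simp [joinC]

theorem pv_join_append_single (parts : List String) (r : String) (h : parts ≠ []) :
    PySem.Str.join ";" (parts ++ [r]) = PySem.Str.join ";" parts ++ ";" ++ r := by
  rw [← String.toList_inj, pv_join_toList, pv_toList_semi, pv_join_toList]
  rw [List.map_append]
  exact pv_joinC_append_singleton _ _ (by simpa using h)

-- ---- pvGood lemmas ----
theorem pv_good_term (rl : List (String × List (String × String))) (start : String) (f : Nat) (p : String)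
    (h : pvTerm p = true) : pvGood rl start f p = true := by
  cases f <;> simp only [pvGood] <;> simp only [pvTerm] at h <;> simp [h]

theorem pv_keysOK_elim (d : List (String × String)) (h : pvKeysOK d = true) :
    (d.map Prod.fst).Nodup ∧ ∀ rp ∈ d, ';' ∉ rp.1.toList := by
  simp only [pvKeysOK, Bool.and_eq_true, decide_eq_true_eq, List.all_eq_true] at h
  exact ⟨h.1, fun rp hrp => by simpa using h.2 rp hrp⟩

theorem pv_good_succ (rl : List (String × List (String × String))) (start : String) (fuel : Nat) (p : String) :
    pvGood rl start (fuel + 1) p = (p == "A" || p == "R" ||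
      (p != start &&
        match (PySem.Dict.mk rl).get? p with
        | none => false
        | some d => pvKeysOK d && d.all (fun kv => pvGood rl start fuel kv.2))) := by
  rfl

theorem pv_good_succ_elim (rl : List (String × List (String × String))) (start : String) (f : Nat) (p : String)
    (h : pvGood rl start (f + 1) p = true) (ht : pvTerm p = false) :
    p ≠ start ∧ ∃ d, (PySem.Dict.mk rl).get? p = some d ∧ pvKeysOK d = true ∧
      ∀ kv ∈ d, pvGood rl start f kv.2 = true := by
  simp only [pvGood] at h
  simp only [pvTerm, Bool.or_eq_false_iff] at ht
  rw [ht.1, ht.2] at h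
  simp only [Bool.or_self, Bool.false_or] at h
  rcases hg : (PySem.Dict.mk rl).get? p with _ | d
  · rw [hg] at h; simp at h
  · rw [hg] at h
    simp only [Bool.and_eq_true, bne_iff_ne, List.all_eq_true] at h
    exact ⟨h.1, d, rfl, h.2.1, fun kv hkv => h.2.2 kv hkv⟩

theorem pv_good_zero (rl : List (String × List (String × String))) (start : String) (p : String)
    (h : pvGood rl start 0 p = true) : pvTerm p = true := h

theorem pv_good_mono (rl : List (String × List (String × String))) (start : String) :
    ∀ (f : Nat) (p : String), pvGood rl start f p = true → pvGood rl start (f + 1) p = true := by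
  intro f
  induction f with
  | zero => intro p h; exact pv_good_term rl start 1 p (pv_good_zero rl start p h)
  | succ f ih =>
    intro p h
    by_cases ht : pvTerm p = true
    · exact pv_good_term rl start _ p ht
    · obtain ⟨hns, d, hd, hk, hall⟩ := pv_good_succ_elim rl start f p h (by simpa using ht)
      have h1 : (p != start) = true := by simpa using hns
      have h3 : d.all (fun kv => pvGood rl start (f + 1) kv.2) = true := by
        rw [List.all_eq_true]; exact fun kv hkv => ih kv.2 (hall kv hkv)
      rw [pv_good_succ rl start (f + 1) p, hd]
      simp [h1, hk, h3]

theorem pv_good_le (rl : List (String × List (String × String))) (start : String)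
    {f g : Nat} (hle : f ≤ g) {p : String} (h : pvGood rl start f p = true) :
    pvGood rl start g p = true := by
  induction g with
  | zero => exact Nat.le_zero.mp hle ▸ h
  | succ g ih =>
    rcases Nat.lt_or_ge f (g + 1) with hlt | hge
    · exact pv_good_mono rl start g p (ih (Nat.lt_succ_iff.mp hlt))
    · exact Nat.le_antisymm hle hge ▸ h

-- ---- expS lemmas ----
theorem pv_expS_term (rl : List (String × List (String × String))) (f : Nat) (k p : String)
    (h : pvTerm p = true) : expS rl (f + 1) k p = [(k, p)] := by
  simp [expS, h]

theorem pv_expS_stable (rl : List (String × List (String × String))) (start : String) :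
    ∀ (f : Nat) (p : String) (k : String) (g g' : Nat), pvGood rl start f p = true →
      f ≤ g → f ≤ g' → expS rl (g + 1) k p = expS rl (g' + 1) k p := by
  intro f
  induction f with
  | zero =>
    intro p k g g' h _ _
    rw [pv_expS_term rl g k p (pv_good_zero rl start p h),
      pv_expS_term rl g' k p (pv_good_zero rl start p h)]
  | succ f ih =>
    intro p k g g' h hg hg'
    by_cases ht : pvTerm p = true
    · rw [pv_expS_term rl g k p ht, pv_expS_term rl g' k p ht]
    · have ht' : pvTerm p = false := by simpa using ht
      obtain ⟨_, d, hd, _, hall⟩ := pv_good_succ_elim rl start f p h ht'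
      obtain ⟨g0, rfl⟩ : ∃ g0, g = g0 + 1 := ⟨g - 1, by omega⟩
      obtain ⟨g1, rfl⟩ : ∃ g1, g' = g1 + 1 := ⟨g' - 1, by omega⟩
      simp only [expS, ht', Bool.false_eq_true, if_neg, not_false_iff, pvL, hd, Option.getD_some]
      refine List.flatMap_congr (fun rp hrp => ?_)
      exact ih rp.2 (k ++ ";" ++ rp.1) g0 g1 (hall rp hrp) (by omega) (by omega)

-- ---- generic fold lemmas ----
theorem pv_foldl_flatMap {α β : Type} (l : List α) (g : α → List (String × String))
    (f : β → (String × String) → β) (a : β) :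
    (l.flatMap g).foldl f a = l.foldl (fun a x => (g x).foldl f a) a := by
  induction l generalizing a with
  | nil => rfl
  | cons x t ih => simp [List.flatMap_cons, List.foldl_append, ih]

theorem pv_fold_items_fresh : ∀ (ps : List (String × String)) (d : PySem.Dict String String),
    (∀ p ∈ ps, d.contains p.1 = false) → (ps.map Prod.fst).Nodup →
    (pvFold d ps).items = d.items ++ ps := by
  intro ps
  induction ps with
  | nil => intro d _ _; simp [pvFold]
  | cons kv t ih =>
    intro d hfresh hnd
    simp only [pvFold, List.foldl_cons]
    have h1 : (d.insert kv.1 kv.2).items = d.items ++ [(kv.1, kv.2)] :=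
      PySem.Dict.items_insert_of_not_contains d kv.2 (hfresh kv List.mem_cons_self)
    have h2 : ∀ p ∈ t, (d.insert kv.1 kv.2).contains p.1 = false := by
      intro p hp
      rw [PySem.Dict.contains_insert]
      have hne : p.1 ≠ kv.1 := by
        simp only [List.map_cons, List.nodup_cons, List.mem_map] at hnd
        exact fun he => hnd.1 ⟨p, hp, he⟩
      simp [hne, hfresh p (List.mem_cons_of_mem _ hp)]
    have hnd' : (t.map Prod.fst).Nodup := by
      simp only [List.map_cons, List.nodup_cons] at hnd
      exact hnd.2
    have h3 := ih (d.insert kv.1 kv.2) h2 hnd'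
    simp only [pvFold] at h3
    rw [h3, h1]
    simp

-- ---- dict lemmas ----
theorem pv_insert_same_items (d : PySem.Dict String (List (String × String))) (k : String)
    (v : List (String × String)) (hnd : d.keys.Nodup) (h : d.get? k = some v) :
    (d.insert k v).items = d.items := by
  have hc : d.contains k = true := by rw [PySem.Dict.contains_eq_isSome_get?, h]; rfl
  rw [PySem.Dict.items_insert_of_contains d v hc]
  conv_rhs => rw [← List.map_id d.items]
  refine List.map_congr_left (fun p hp => ?_)
  obtain ⟨p1, p2⟩ := p
  by_cases he : p1 = k
  · subst he
    have hv : d.get? p1 = some p2 := PySem.Dict.get?_of_mem_items d hp hnd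
    rw [h] at hv
    simp [Option.some_inj.mp hv]
  · simp [he]

-- ---- B's DFS = a fold over expS ----
theorem pv_dfs_eq_expS (rl : List (String × List (String × String))) :
    ∀ (f : Nat) (parts : List String) (p : String) (out : PySem.Dict String String), parts ≠ [] →
      pvExpandDFS rl f parts p out = pvFold out (expS rl f (PySem.Str.join ";" parts) p) := by
  intro f
  induction f with
  | zero => intro parts p out _; rfl
  | succ f ih =>
    intro parts p out hne
    by_cases ht : pvTerm p = true
    · have ht' : (p == "A" || p == "R") = true := ht
      simp [pvExpandDFS, ht', pv_expS_term rl f _ p ht, pvFold]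
    · have ht' : (p == "A" || p == "R") = false := by simpa [pvTerm] using ht
      have ht2 : pvTerm p = false := ht'
      simp only [pvExpandDFS, ht', Bool.false_eq_true, if_neg, not_false_iff, expS, ht2]
      rw [pvFold, pv_foldl_flatMap]
      refine PySem.List.foldl_congr_mem _ _ _ _ (fun acc rp hrp => ?_)
      rw [ih (parts ++ [rp.1]) rp.2 acc (by simp), pv_join_append_single parts rp.1 hne]
      rfl

-- ---- one round of A = a fold over stepE ----
theorem pv_round_eq (rl rcur : List (String × List (String × String))) (start : String)
    (c : List (String × String))
    (Hlook : ∀ p, p ≠ start → (PySem.Dict.mk rcur).get? p = (PySem.Dict.mk rl).get? p)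
    (Hg : ∀ kv ∈ c, pvTerm kv.2 = false → kv.2 ≠ start) :
    pvExpandA rcur c = pvFold PySem.Dict.empty (stepE rl c) := by
  unfold pvExpandA stepE
  rw [pvFold, pv_foldl_flatMap]
  refine PySem.List.foldl_congr_mem _ _ _ _ (fun acc kv hkv => ?_)
  by_cases ht : pvTerm kv.2 = true
  · have ht' : (kv.2 == "A" || kv.2 == "R") = true := ht
    simp only [ht', if_pos, ht, List.foldl_cons, List.foldl_nil, List.nil_append, pv_join_single]
  · have ht' : (kv.2 == "A" || kv.2 == "R") = false := by simpa [pvTerm] using ht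
    have ht2 : pvTerm kv.2 = false := ht'
    simp only [ht', Bool.false_eq_true, if_neg, not_false_iff, ht2]
    rw [Hlook kv.2 (Hg kv hkv ht2), List.foldl_map]
    refine PySem.List.foldl_congr_mem _ _ _ _ (fun acc2 rp _ => ?_)
    simp only [List.nil_append, List.singleton_append]
    rw [pv_join_pair]

-- ---- flatExp lemmas ----
theorem pv_flatExp_term (rl : List (String × List (String × String))) (c : List (String × String))
    (h : ∀ kv ∈ c, pvTerm kv.2 = true) : flatExp rl c = c := by
  unfold flatExp
  rw [List.flatMap_congr (fun kv hkv => pv_expS_term rl rl.length kv.1 kv.2 (h kv hkv))]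
  exact List.flatMap_singleton' c

theorem pv_flatExp_step (rl : List (String × List (String × String))) (start : String)
    (c : List (String × String)) (Hg : GoodsF rl start rl.length c) :
    flatExp rl (stepE rl c) = flatExp rl c := by
  unfold flatExp stepE
  rw [List.flatMap_assoc]
  refine List.flatMap_congr (fun kv hkv => ?_)
  by_cases ht : pvTerm kv.2 = true
  · simp only [ht, if_pos, List.flatMap_cons, List.flatMap_nil, List.append_nil]
  · have ht' : pvTerm kv.2 = false := by simpa using ht
    simp only [ht', Bool.false_eq_true, if_neg, not_false_iff]
    rw [List.flatMap_map]
    have hgood := Hg kv hkv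
    obtain ⟨n', hn'⟩ : ∃ n', rl.length = n' + 1 := by
      cases hl : rl.length with
      | zero =>
        exfalso
        rw [hl] at hgood
        rw [pv_good_zero rl start kv.2 hgood] at ht'
        exact absurd ht' (by simp)
      | succ n' => exact ⟨n', rfl⟩
    rw [hn'] at hgood
    obtain ⟨_, d, hd, _, hall⟩ := pv_good_succ_elim rl start n' kv.2 hgood ht'
    conv_rhs => rw [show rl.length + 1 = (n' + 1) + 1 by omega, expS]
    simp only [ht', Bool.false_eq_true, if_neg, not_false_iff, pvL, hd, Option.getD_some]
    refine List.flatMap_congr (fun rp hrp => ?_)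
    have := pv_expS_stable rl start n' rp.2 (kv.1 ++ ";" ++ rp.1) rl.length n'
      (hall rp hrp) (by omega) (by omega)
    rw [hn'] at this ⊢
    exact this

-- ---- goods through a round ----
theorem pv_goods_step (rl : List (String × List (String × String))) (start : String) (f : Nat)
    (c : List (String × String)) (Hg : GoodsF rl start (f + 1) c) :
    GoodsF rl start f (stepE rl c) := by
  intro kv hkv
  unfold stepE at hkv
  rw [List.mem_flatMap] at hkv
  obtain ⟨x, hx, hkv⟩ := hkv
  by_cases ht : pvTerm x.2 = true
  · simp only [ht, if_pos, List.mem_singleton] at hkv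
    exact hkv ▸ pv_good_term rl start f x.2 ht
  · have ht' : pvTerm x.2 = false := by simpa using ht
    simp only [ht', Bool.false_eq_true, if_neg, not_false_iff, List.mem_map] at hkv
    obtain ⟨rp, hrp, hkv⟩ := hkv
    obtain ⟨_, d, hd, _, hall⟩ := pv_good_succ_elim rl start f x.2 (Hg x hx) ht'
    rw [pvL, hd, Option.getD_some] at hrp
    exact hkv ▸ hall rp hrp

-- ---- model correspondence ----
theorem pv_rel_step (rl : List (String × List (String × String))) :
    ∀ (c : List (String × String)) (m : List (List (List Char) × String)),
      KRel c m → (∀ x ∈ m, x.1 ≠ []) → KRel (stepE rl c) (stepM rl m) := by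
  intro c
  induction c with
  | nil =>
    intro m hr _
    cases m with
    | nil => rfl
    | cons y t => exact absurd hr (by simp [KRel])
  | cons kv t ih =>
    intro m hr hne
    cases m with
    | nil => exact absurd hr (by simp [KRel])
    | cons x mt =>
      simp only [KRel, List.map_cons, List.cons.injEq, Prod.mk.injEq] at hr
      obtain ⟨⟨hk, hv⟩, hrest⟩ := hr
      have ihr := ih mt hrest (fun z hz => hne z (List.mem_cons_of_mem _ hz))
      simp only [KRel, stepE, stepM, List.flatMap_cons, List.map_append] at ihr ⊢
      rw [ihr]
      congr 1
      by_cases ht : pvTerm kv.2 = true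
      · have ht2 : pvTerm x.2 = true := by rw [← hv]; exact ht
        simp only [ht, ht2, if_pos, List.map_cons, List.map_nil]
        rw [hk, hv]
      · have ht1 : pvTerm kv.2 = false := by simpa using ht
        have ht2 : pvTerm x.2 = false := by rw [← hv]; exact ht1
        simp only [ht2, Bool.false_eq_true, if_neg, not_false_iff, List.map_map, hv]
        refine List.map_congr_left (fun rp _ => ?_)
        simp only [Function.comp_apply, Prod.mk.injEq, and_true]
        rw [pv_toList_semi, hk, pv_joinC_append_singleton x.1 rp.1.toList (hne x List.mem_cons_self)]

theorem pv_wf_step (rl : List (String × List (String × String)))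
    (m : List (List (List Char) × String)) (hwf : Wf m)
    (Hk : ∀ x ∈ m, pvTerm x.2 = false →
      ((pvL rl x.2).map Prod.fst).Nodup ∧ ∀ rp ∈ pvL rl x.2, ';' ∉ rp.1.toList) :
    Wf (stepM rl m) := by
  obtain ⟨hpw, hcomp⟩ := hwf
  constructor
  · rw [stepM, List.pairwise_flatMap]
    constructor
    · intro x hx
      by_cases ht : pvTerm x.2 = true
      · simp [ht]
      · have ht' : pvTerm x.2 = false := by simpa using ht
        simp only [ht', Bool.false_eq_true, if_neg, not_false_iff]
        rw [List.pairwise_map]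
        have hnd : ((pvL rl x.2).map Prod.fst).Nodup := (Hk x hx ht').1
        have hpne : (pvL rl x.2).Pairwise (fun rp rq => rp.1 ≠ rq.1) := by
          rw [List.Nodup, List.pairwise_map] at hnd
          exact hnd
        refine hpne.imp_of_mem (fun {rp rq} _ _ hne => ?_)
        constructor
        · intro hpre
          have := hpre.eq_of_length (by simp)
          have := List.append_cancel_left this
          simp only [List.cons.injEq, and_true] at this
          exact hne (String.toList_inj.mp this)
        · intro hpre
          have := hpre.eq_of_length (by simp)
          have := List.append_cancel_left this
          simp only [List.cons.injEq, and_true] at this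
          exact hne (String.toList_inj.mp this).symm
    · refine hpw.imp_of_mem (fun {x y} hx hy hac => ?_)
      intro a ha b hb
      have hxy1 : ¬ x.1 <+: y.1 := hac.1
      have hxy2 : ¬ y.1 <+: x.1 := hac.2
      have hmem : ∀ (z : List (List Char) × String) (w : List (List Char) × String),
          w ∈ (if pvTerm z.2 then [z]
            else (pvL rl z.2).map (fun rp => (z.1 ++ [rp.1.toList], rp.2))) →
          w.1 = z.1 ∨ ∃ r, w.1 = z.1 ++ [r] := by
        intro z w hw
        by_cases ht : pvTerm z.2 = true
        · simp only [ht, if_pos, List.mem_singleton] at hw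
          exact Or.inl (hw ▸ rfl)
        · have ht' : pvTerm z.2 = false := by simpa using ht
          simp only [ht', Bool.false_eq_true, if_neg, not_false_iff, List.mem_map] at hw
          obtain ⟨rp, _, hw⟩ := hw
          exact Or.inr ⟨rp.1.toList, hw ▸ rfl⟩
      rcases hmem x a ha with h1 | ⟨r, h1⟩ <;> rcases hmem y b hb with h2 | ⟨s, h2⟩ <;>
        rw [KAC, h1, h2]
      · exact hac
      · constructor
        · intro hpre
          rcases List.prefix_concat_iff.mp hpre with heq | hpre'
          · exact hxy2 (heq ▸ List.prefix_append y.1 [s])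
          · exact hxy1 hpre'
        · intro hpre
          exact hxy2 ((List.prefix_append y.1 [s]).trans hpre)
      · constructor
        · intro hpre
          exact hxy1 ((List.prefix_append x.1 [r]).trans hpre)
        · intro hpre
          rcases List.prefix_concat_iff.mp hpre with heq | hpre'
          · exact hxy1 (heq ▸ List.prefix_append x.1 [r])
          · exact hxy2 hpre'
      · constructor
        · intro hpre
          rcases List.prefix_concat_iff.mp hpre with heq | hpre'
          · have : x.1 <+: y.1 ++ [s] := heq ▸ List.prefix_append x.1 [r]
            rcases List.prefix_concat_iff.mp this with heq2 | hpre2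
            · exact hxy2 (heq2 ▸ List.prefix_append y.1 [s])
            · exact hxy1 hpre2
          · exact hxy1 ((List.prefix_append x.1 [r]).trans hpre')
        · intro hpre
          rcases List.prefix_concat_iff.mp hpre with heq | hpre'
          · have : y.1 <+: x.1 ++ [r] := heq ▸ List.prefix_append y.1 [s]
            rcases List.prefix_concat_iff.mp this with heq2 | hpre2
            · exact hxy1 (heq2 ▸ List.prefix_append x.1 [r])
            · exact hxy2 hpre2
          · exact hxy2 ((List.prefix_append y.1 [s]).trans hpre')
  · intro x hx
    rw [stepM, List.mem_flatMap] at hx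
    obtain ⟨y, hy, hx⟩ := hx
    by_cases ht : pvTerm y.2 = true
    · simp only [ht, if_pos, List.mem_singleton] at hx
      exact hx ▸ hcomp y hy
    · have ht' : pvTerm y.2 = false := by simpa using ht
      simp only [ht', Bool.false_eq_true, if_neg, not_false_iff, List.mem_map] at hx
      obtain ⟨rp, hrp, hx⟩ := hx
      subst hx
      refine ⟨by simp, fun s hs => ?_⟩
      rw [List.mem_append] at hs
      rcases hs with hs | hs
      · exact (hcomp y hy).2 s hs
      · rw [List.mem_singleton] at hs
        exact hs ▸ (Hk y hy ht').2 rp hrp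

theorem pv_keys_nodup (c : List (String × String)) (m : List (List (List Char) × String))
    (hr : KRel c m) (hwf : Wf m) : (c.map Prod.fst).Nodup := by
  have h1 : c.map (fun kv => kv.1.toList) = m.map (fun x => joinC x.1) := by
    have := congrArg (List.map Prod.fst) hr
    simpa [List.map_map, Function.comp] using this
  refine List.Nodup.of_map String.toList ?_
  have h2 : (c.map Prod.fst).map String.toList = c.map (fun kv => kv.1.toList) := by
    simp [List.map_map, Function.comp]
  rw [h2, h1, List.Nodup, List.pairwise_map]
  refine hwf.1.imp_of_mem (fun {x y} hx hy hac => ?_)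
  intro heq
  have hx1 := hwf.2 x hx
  have hy1 := hwf.2 y hy
  have := pv_joinC_inj x.1 y.1 hx1.1 hy1.1 hx1.2 hy1.2 heq
  exact hac.1 (this ▸ List.prefix_refl x.1)

-- the all-terminal situation: the fold over flatExp reproduces the current start dict
theorem pv_term_case (rl rcur : List (String × List (String × String))) (start : String)
    (c : List (String × String)) (m : List (List (List Char) × String))
    (hnd : (rcur.map Prod.fst).Nodup)
    (hc : (PySem.Dict.mk rcur).get? start = some c)
    (hrel : KRel c m) (hwf : Wf m)
    (hallt : ∀ kv ∈ c, pvTerm kv.2 = true) :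
    rcur = ((PySem.Dict.mk rcur).insert start (pvFold PySem.Dict.empty (flatExp rl c)).items).items := by
  rw [pv_flatExp_term rl c hallt]
  have hitems : (pvFold PySem.Dict.empty c).items = c := by
    rw [pv_fold_items_fresh c PySem.Dict.empty (fun p _ => PySem.Dict.contains_empty p.1)
      (pv_keys_nodup c m hrel hwf)]
    rfl
  rw [hitems]
  have hk : (PySem.Dict.mk rcur).keys.Nodup := hnd
  rw [pv_insert_same_items (PySem.Dict.mk rcur) start c hk hc]

-- ---- the main induction over A's rounds ----
theorem pv_main (rl : List (String × List (String × String))) (start : String) :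
    ∀ (f : Nat) (c : List (String × String)) (m : List (List (List Char) × String))
      (rcur : List (String × List (String × String))),
      f ≤ rl.length →
      (rcur.map Prod.fst).Nodup →
      (PySem.Dict.mk rcur).get? start = some c →
      (∀ p, p ≠ start → (PySem.Dict.mk rcur).get? p = (PySem.Dict.mk rl).get? p) →
      KRel c m → Wf m → GoodsF rl start f c →
      reduce_rules_go (f + 1) rcur start =
        ((PySem.Dict.mk rcur).insert start (pvFold PySem.Dict.empty (flatExp rl c)).items).items := by
  intro f
  induction f with
  | zero =>
    intro c m rcur _ hnd hc hlook hrel hwf hgoods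
    have hallt : ∀ kv ∈ c, pvTerm kv.2 = true :=
      fun kv hkv => pv_good_zero rl start kv.2 (hgoods kv hkv)
    have hall : pvAllAR c = true := by
      rw [pvAllAR, List.all_eq_true]
      exact fun kv hkv => hallt kv hkv
    simp only [reduce_rules_go, hc, Option.getD_some, hall, if_pos]
    exact pv_term_case rl rcur start c m hnd hc hrel hwf hallt
  | succ f ih =>
    intro c m rcur hfle hnd hc hlook hrel hwf hgoods
    by_cases hall : pvAllAR c = true
    · have hallt : ∀ kv ∈ c, pvTerm kv.2 = true := by
        rw [pvAllAR, List.all_eq_true] at hall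
        exact fun kv hkv => hall kv hkv
      simp only [reduce_rules_go, hc, Option.getD_some, hall, if_pos]
      exact pv_term_case rl rcur start c m hnd hc hrel hwf hallt
    · have hgne : ∀ kv ∈ c, pvTerm kv.2 = false → kv.2 ≠ start :=
        fun kv hkv ht => (pv_good_succ_elim rl start f kv.2 (hgoods kv hkv) ht).1
      have hHk : ∀ x ∈ m, pvTerm x.2 = false →
          ((pvL rl x.2).map Prod.fst).Nodup ∧ ∀ rp ∈ pvL rl x.2, ';' ∉ rp.1.toList := by
        intro x hx htx
        have hsnd : c.map Prod.snd = m.map Prod.snd := by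
          have := congrArg (List.map Prod.snd) hrel
          simpa [List.map_map, Function.comp] using this
        have hx2 : x.2 ∈ c.map Prod.snd := by
          rw [hsnd]
          exact List.mem_map_of_mem hx
        rw [List.mem_map] at hx2
        obtain ⟨kv, hkv, hkv2⟩ := hx2
        obtain ⟨_, d, hd, hkOK, _⟩ :=
          pv_good_succ_elim rl start f kv.2 (hgoods kv hkv) (hkv2 ▸ htx)
        have hdl : pvL rl x.2 = d := by rw [← hkv2, pvL, hd, Option.getD_some]
        rw [hdl]
        exact pv_keysOK_elim d hkOK
      have hrel' : KRel (stepE rl c) (stepM rl m) :=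
        pv_rel_step rl c m hrel (fun x hx => (hwf.2 x hx).1)
      have hwf' : Wf (stepM rl m) := pv_wf_step rl m hwf hHk
      have hitems : (pvFold PySem.Dict.empty (stepE rl c)).items = stepE rl c := by
        rw [pv_fold_items_fresh (stepE rl c) PySem.Dict.empty
          (fun p _ => PySem.Dict.contains_empty p.1) (pv_keys_nodup _ _ hrel' hwf')]
        rfl
      have hstep : reduce_rules_go (f + 1 + 1) rcur start =
          reduce_rules_go (f + 1)
            (((PySem.Dict.mk rcur).insert start (stepE rl c)).items) start := by
        simp only [reduce_rules_go, hc, Option.getD_some, hall, Bool.false_eq_true, if_neg,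
          not_false_iff]
        rw [pv_round_eq rl rcur start c hlook hgne, hitems]
      rw [hstep]
      have hmk : PySem.Dict.mk (((PySem.Dict.mk rcur).insert start (stepE rl c)).items)
          = (PySem.Dict.mk rcur).insert start (stepE rl c) := rfl
      have hres := ih (stepE rl c) (stepM rl m)
        (((PySem.Dict.mk rcur).insert start (stepE rl c)).items)
        (by omega)
        (by
          have : ((PySem.Dict.mk rcur).insert start (stepE rl c)).keys.Nodup :=
            PySem.Dict.nodup_keys_insert (PySem.Dict.mk rcur) start (stepE rl c) hnd
          exact this)
        (by rw [hmk]; exact PySem.Dict.get?_insert_self (PySem.Dict.mk rcur) start (stepE rl c))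
        (by
          intro p hp
          rw [hmk, PySem.Dict.get?_insert_of_ne (PySem.Dict.mk rcur) (stepE rl c) hp]
          exact hlook p hp)
        hrel' hwf' (pv_goods_step rl start f c hgoods)
      rw [hres, hmk, pv_flatExp_step rl start c
        (fun kv hkv => pv_good_le rl start hfle (hgoods kv hkv)),
        PySem.Dict.insert_insert_self]

-- ===== VERDICT (by name: the statement is the Claim_ definition above) =====
theorem reduce_rules_spec : Claim_equal_reduce_rules := by
  intro rl start _ hpre
  obtain ⟨hnd, hsome, hkeys, hgood⟩ := hpre
  obtain ⟨c0, hc0⟩ := Option.isSome_iff_exists.mp hsome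
  rw [hc0, Option.getD_some] at hkeys hgood
  unfold Spec_reduce_rules reduce_rules reduce_rules_alt
  by_cases hall : pvAllAR c0 = true
  · have hall' : c0.all (fun kv => kv.2 == "A" || kv.2 == "R") = true := hall
    simp only [reduce_rules_go, hc0, Option.getD_some, hall, hall', if_pos]
  · obtain ⟨hknd, hkfree⟩ := pv_keysOK_elim c0 hkeys
    -- the initial component model: each key is its own single component
    have hrel0 : KRel c0 (c0.map (fun kv => ([kv.1.toList], kv.2))) := by
      simp [KRel, List.map_map, Function.comp, pv_joinC_single]
    have hwf0 : Wf (c0.map (fun kv => ([kv.1.toList], kv.2))) := by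
      constructor
      · rw [List.pairwise_map]
        have hpne : c0.Pairwise (fun rp rq => rp.1 ≠ rq.1) := by
          rw [List.Nodup, List.pairwise_map] at hknd
          exact hknd
        refine hpne.imp_of_mem (fun {rp rq} _ _ hne => ?_)
        constructor
        · intro hpre
          have := (List.cons_prefix_cons.mp hpre).1
          exact hne (String.toList_inj.mp this)
        · intro hpre
          have := (List.cons_prefix_cons.mp hpre).1
          exact hne (String.toList_inj.mp this).symm
      · intro x hx
        rw [List.mem_map] at hx
        obtain ⟨kv, hkv, hx⟩ := hx
        subst hx
        exact ⟨by simp, fun s hs => by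
          rw [List.mem_singleton] at hs
          exact hs ▸ hkfree kv hkv⟩
    have hA := pv_main rl start rl.length c0 (c0.map (fun kv => ([kv.1.toList], kv.2))) rl
      (le_refl _) hnd hc0 (fun p _ => rfl) hrel0 hwf0 hgood
    rw [hA]
    have hall' : c0.all (fun kv => kv.2 == "A" || kv.2 == "R") = false := by
      rw [← Bool.not_eq_true]
      exact hall
    simp only [hc0, Option.getD_some, hall', Bool.false_eq_true, if_neg, not_false_iff]
    -- B's fold equals the fold over flatExp
    have hB : c0.foldl (fun out kv => pvExpandDFS rl (rl.length + 1) [kv.1] kv.2 out)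
        PySem.Dict.empty = pvFold PySem.Dict.empty (flatExp rl c0) := by
      rw [pvFold, flatExp, pv_foldl_flatMap]
      refine PySem.List.foldl_congr_mem _ _ _ _ (fun acc kv _ => ?_)
      rw [pv_dfs_eq_expS rl (rl.length + 1) [kv.1] kv.2 acc (by simp), pv_join_single]
      rfl
    rw [hB]
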